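-- pv_equiv track=rewrite | github.com/fernandogonzalez11/cybersec | ctfs/crewctf/crack2.py | compute_modulus
-- ===== SOURCE A (Python) =====
-- import math
-- from functools import reduce
--
-- def compute_modulus(outputs):
--     ts = []
--     for i in range(0, len(outputs) - 1):
--         ts.append(outputs[i+1] - outputs[i])
--
--     us = []
--     for i in range(0, len(ts)-2):
--         us.append(abs(ts[i+2]*ts[i] - ts[i+1]**2))
--
--     modulus =  reduce(math.gcd, us) #!
--     return modulus
-- ===== SOURCE B (Python) =====
-- import math
--
-- def compute_modulus(outputs):
--     # Divide-and-conquer: gcd of the second-order terms by recursive halving.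
--     # gcd is associative and commutative, so the tree reduction equals a
--     # sequential reduce; each term is computed directly from outputs, with no
--     # intermediate difference lists.
--     def term(i):
--         a = outputs[i + 1] - outputs[i]
--         b = outputs[i + 2] - outputs[i + 1]
--         c = outputs[i + 3] - outputs[i + 2]
--         return abs(c * a - b * b)
--
--     def gcd_range(lo, hi):
--         if hi <= lo:
--             return 0
--         if hi - lo == 1:
--             return term(lo)
--         mid = (lo + hi) // 2
--         return math.gcd(gcd_range(lo, mid), gcd_range(mid, hi))
--
--     return gcd_range(0, len(outputs) - 3)
-- ===== Notes on version B (the rewrite author's own statement) =====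
-- stated objective: alternative
-- what changed: B replaces A's staged difference lists plus linear left-fold reduce with a recursive divide-and-conquer tree reduction over lo/hi index ranges, computing each second-order term directly from outputs; correct because gcd is associative and commutative.
import Mathlib
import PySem

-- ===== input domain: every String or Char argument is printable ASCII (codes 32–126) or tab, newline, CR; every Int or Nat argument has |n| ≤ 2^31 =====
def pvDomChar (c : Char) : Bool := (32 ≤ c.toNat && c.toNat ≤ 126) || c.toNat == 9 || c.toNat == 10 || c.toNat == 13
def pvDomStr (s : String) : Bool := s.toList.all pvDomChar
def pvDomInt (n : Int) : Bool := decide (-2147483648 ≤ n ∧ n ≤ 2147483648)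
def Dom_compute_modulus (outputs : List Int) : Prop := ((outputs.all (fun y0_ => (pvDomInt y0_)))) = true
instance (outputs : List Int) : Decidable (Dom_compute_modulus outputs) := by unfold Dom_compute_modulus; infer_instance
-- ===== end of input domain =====

-- B replaces A's staged difference lists and left-fold reduce with a recursive
-- divide-and-conquer tree reduction (gcd is associative/commutative), computing
-- each second-order term directly from outputs (objective: alternative).

-- Python math.gcd on ints (always nonnegative result)
def pyGcd (a b : Int) : Int := (Int.gcd a b : Int)

-- ===== PORT A =====
-- reduce(math.gcd, l); Python raises TypeError on empty l — excluded by Pre_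
def pyReduceGcd (l : List Int) : Int :=
  match l with
  | [] => 0
  | u :: rest => rest.foldl pyGcd u

def compute_modulus (outputs : List Int) : Int :=
  -- ts: first differences
  let ts := (List.range (outputs.length - 1)).map
    (fun i => outputs.getD (i + 1) 0 - outputs.getD i 0)
  -- us: abs of second-order determinants
  let us := (List.range (ts.length - 2)).map
    (fun i => |ts.getD (i + 2) 0 * ts.getD i 0 - (ts.getD (i + 1) 0) ^ 2|)
  pyReduceGcd us

-- ===== PORT B =====
-- B's term(i): second-order determinant computed directly from outputs
def termB (outputs : List Int) (i : ℕ) : Int :=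
  |(outputs.getD (i + 3) 0 - outputs.getD (i + 2) 0) *
     (outputs.getD (i + 1) 0 - outputs.getD i 0) -
   (outputs.getD (i + 2) 0 - outputs.getD (i + 1) 0) *
   (outputs.getD (i + 2) 0 - outputs.getD (i + 1) 0)|

-- B's gcd_range(lo, hi): divide-and-conquer gcd over term lo .. term (hi-1).
-- `fuel` only makes the halving recursion structural (any fuel ≥ hi - lo gives
-- Python's value); ℕ indices: Python's possibly negative hi = len-3 hits the
-- `hi <= lo` guard and returns 0 exactly as ℕ truncation `length - 3 = 0` does.
def gcdRange (outputs : List Int) (fuel lo hi : ℕ) : Int :=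
  match fuel with
  | 0 => 0
  | fuel + 1 =>
    if hi ≤ lo then 0
    else if hi - lo = 1 then termB outputs lo
    else
      let mid := (lo + hi) / 2
      pyGcd (gcdRange outputs fuel lo mid) (gcdRange outputs fuel mid hi)

def compute_modulus_alt (outputs : List Int) : Int :=
  gcdRange outputs outputs.length 0 (outputs.length - 3)

-- ===== PRECONDITION & SPEC =====
-- Pre_ excludes exactly the inputs (fewer than 4 elements) on which A's reduce
-- over the empty us list raises TypeError.
def Pre_compute_modulus (outputs : List Int) : Prop := 4 ≤ outputs.length
instance (outputs : List Int) : Decidable (Pre_compute_modulus outputs) := by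
  unfold Pre_compute_modulus; infer_instance
def pvWitness_compute_modulus : List Int := [1, 3, 9, 27, 81]

def Spec_compute_modulus (outputs : List Int) (out : Int) : Prop := out = compute_modulus_alt outputs
instance (outputs : List Int) (out : Int) : Decidable (Spec_compute_modulus outputs out) := by unfold Spec_compute_modulus; infer_instance

-- ===== CLAIM (what is proved, stated in full; the proofs are below) =====
def Claim_equal_compute_modulus : Prop := ∀ (outputs : List Int), Dom_compute_modulus outputs → Pre_compute_modulus outputs → Spec_compute_modulus outputs (compute_modulus outputs)

-- ===== LEMMAS AND PROOFS =====

-- ℕ-valued gcd-fold step used only in the proofs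
def nstep (g : ℕ) (x : Int) : ℕ := Nat.gcd g x.natAbs

theorem castFold (l : List Int) (a : ℕ) :
    l.foldl pyGcd (a : Int) = ((l.foldl nstep a : ℕ) : Int) := by
  induction l generalizing a with
  | nil => simp
  | cons x xs ih =>
    simp only [List.foldl_cons]
    have h : pyGcd (a : Int) x = ((Nat.gcd a x.natAbs : ℕ) : Int) := by
      simp [pyGcd, Int.gcd]
    rw [h, ih]
    rfl

theorem natFold_gcd (l : List Int) (a : ℕ) :
    l.foldl nstep a = Nat.gcd a (l.foldl nstep 0) := by
  induction l generalizing a with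
  | nil => simp [Nat.gcd_zero_right]
  | cons x xs ih =>
    simp only [List.foldl_cons]
    rw [ih (nstep a x), ih (nstep 0 x)]
    simp [nstep, Nat.gcd_assoc]

theorem natFold_append (l1 l2 : List Int) :
    (l1 ++ l2).foldl nstep 0 = Nat.gcd (l1.foldl nstep 0) (l2.foldl nstep 0) := by
  rw [List.foldl_append, natFold_gcd]

-- A's reduce result, expressed as the ℕ gcd-fold (on lists of nonnegatives)
theorem reduceFold (l : List Int) (h : ∀ x ∈ l, 0 ≤ x) :
    pyReduceGcd l = ((l.foldl nstep 0 : ℕ) : Int) := by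
  cases l with
  | nil => simp [pyReduceGcd]
  | cons u rest =>
    have hu : 0 ≤ u := h u (by simp)
    have hcast : u = ((u.natAbs : ℕ) : Int) := by
      rw [Int.natCast_natAbs, abs_of_nonneg hu]
    simp only [pyReduceGcd, List.foldl_cons]
    rw [hcast, castFold]
    simp [nstep, Int.natAbs_abs]

-- divide-and-conquer gcd = ℕ gcd-fold over the mapped term list
theorem gcdRange_eq (outputs : List Int) :
    ∀ (n lo fuel : ℕ), n ≤ fuel → gcdRange outputs fuel lo (lo + n) =
      ((((List.range' lo n).map (termB outputs)).foldl nstep 0 : ℕ) : Int) := by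
  intro n
  induction n using Nat.strong_induction_on with
  | _ n ih =>
    intro lo fuel hfuel
    match n with
    | 0 =>
      cases fuel with
      | zero => simp [gcdRange]
      | succ f => simp [gcdRange]
    | 1 =>
      obtain ⟨f, rfl⟩ : ∃ f, fuel = f + 1 := ⟨fuel - 1, by omega⟩
      simp only [gcdRange]
      rw [if_neg (by omega), if_pos (by omega)]
      simp [nstep, termB, abs_abs]
    | (m + 2) =>
      obtain ⟨f, rfl⟩ : ∃ f, fuel = f + 1 := ⟨fuel - 1, by omega⟩
      simp only [gcdRange]
      rw [if_neg (by omega), if_neg (by omega)]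
      obtain ⟨k, hk⟩ : ∃ k, (m + 2) / 2 = k := ⟨_, rfl⟩
      have hmid : (lo + (lo + (m + 2))) / 2 = lo + k := by omega
      have hk1 : 1 ≤ k := by omega
      have hk2 : k < m + 2 := by omega
      simp only [hmid]
      rw [ih k hk2 lo f (by omega)]
      have h2 : lo + (m + 2) = (lo + k) + (m + 2 - k) := by omega
      rw [h2, ih (m + 2 - k) (by omega) (lo + k) f (by omega)]
      have hsum : k + (m + 2 - k) = m + 2 := by omega
      have hsplit : List.range' lo (m + 2) =
          List.range' lo k ++ List.range' (lo + k) (m + 2 - k) := by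
        rw [List.range'_append_1, hsum]
      rw [hsplit, List.map_append, natFold_append]
      simp [pyGcd, Int.gcd]

theorem getD_range_map {α : Type} (n j : ℕ) (g : ℕ → α) (d : α) :
    ((List.range n).map g).getD j d = if j < n then g j else d := by
  rcases lt_or_ge j n with h | h
  · rw [List.getD_eq_getElem]
    · simp [h]
    · simpa using h
  · rw [List.getD_eq_default]
    · simp [Nat.not_lt.mpr h]
    · simpa using h

-- A's second-order term, expressed directly from outputs, equals B's term
theorem term_eq (outputs : List Int) (i : ℕ) (hi : i < outputs.length - 3) :
    |((List.range (outputs.length - 1)).map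
        (fun j => outputs.getD (j + 1) 0 - outputs.getD j 0)).getD (i + 2) 0 *
      ((List.range (outputs.length - 1)).map
        (fun j => outputs.getD (j + 1) 0 - outputs.getD j 0)).getD i 0 -
      (((List.range (outputs.length - 1)).map
        (fun j => outputs.getD (j + 1) 0 - outputs.getD j 0)).getD (i + 1) 0) ^ 2| =
    termB outputs i := by
  unfold termB
  rw [getD_range_map, getD_range_map, getD_range_map]
  rw [if_pos (by omega), if_pos (by omega), if_pos (by omega)]
  ring_nf

-- ===== VERDICT (by name: the statement is the Claim_ definition above) =====
theorem compute_modulus_spec : Claim_equal_compute_modulus := by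
  unfold Claim_equal_compute_modulus
  intro outputs _ hpre
  unfold Pre_compute_modulus at hpre
  unfold Spec_compute_modulus compute_modulus compute_modulus_alt
  simp only []
  have hlen : (((List.range (outputs.length - 1)).map
      (fun j => outputs.getD (j + 1) 0 - outputs.getD j 0)).length - 2)
      = outputs.length - 3 := by simp; omega
  have hus : (List.range (((List.range (outputs.length - 1)).map
        (fun j => outputs.getD (j + 1) 0 - outputs.getD j 0)).length - 2)).map
      (fun i => |((List.range (outputs.length - 1)).map
          (fun j => outputs.getD (j + 1) 0 - outputs.getD j 0)).getD (i + 2) 0 *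
        ((List.range (outputs.length - 1)).map
          (fun j => outputs.getD (j + 1) 0 - outputs.getD j 0)).getD i 0 -
        (((List.range (outputs.length - 1)).map
          (fun j => outputs.getD (j + 1) 0 - outputs.getD j 0)).getD (i + 1) 0) ^ 2|)
      = (List.range (outputs.length - 3)).map (termB outputs) := by
    rw [hlen]
    apply List.map_congr_left
    intro i hi
    exact term_eq outputs i (List.mem_range.mp hi)
  rw [hus]
  rw [reduceFold _ (by
    intro x hx
    obtain ⟨i, _, rfl⟩ := List.mem_map.mp hx
    exact abs_nonneg _)]
  have hb := gcdRange_eq outputs (outputs.length - 3) 0 outputs.length (by omega)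
  simp only [Nat.zero_add] at hb
  rw [hb, List.range_eq_range']
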